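-- pv_equiv track=rewrite | github.com/asayao-fp/keiba_sp | src/benefits/maternity.py | _spouse_special_deduction
-- ===== SOURCE A (Python) =====
-- def _spouse_special_deduction(taxpayer_income: int, spouse_income: int) -> int:
--     """配偶者特別控除額を返す (内部関数)。"""
--     # 配偶者所得金額に応じた控除額テーブル (納税者所得 900万円以下の場合)
--     # (所得下限, 所得上限, 控除額)
--     _brackets_900 = [
--         (480_001,   950_000, 380_000),
--         (950_001, 1_000_000, 360_000),
--         (1_000_001, 1_050_000, 310_000),
--         (1_050_001, 1_100_000, 260_000),
--         (1_100_001, 1_150_000, 210_000),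
--         (1_150_001, 1_200_000, 160_000),
--         (1_200_001, 1_250_000, 110_000),
--         (1_250_001, 1_300_000,  60_000),
--         (1_300_001, 1_330_000,  30_000),
--     ]
--     # 納税者所得 900万円超 950万円以下
--     _brackets_950 = [
--         (480_001,   950_000, 260_000),
--         (950_001, 1_000_000, 240_000),
--         (1_000_001, 1_050_000, 210_000),
--         (1_050_001, 1_100_000, 180_000),
--         (1_100_001, 1_150_000, 140_000),
--         (1_150_001, 1_200_000, 110_000),
--         (1_200_001, 1_250_000,  80_000),
--         (1_250_001, 1_300_000,  40_000),
--         (1_300_001, 1_330_000,  20_000),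
--     ]
--     # 納税者所得 950万円超 1,000万円以下
--     _brackets_1000 = [
--         (480_001,   950_000, 130_000),
--         (950_001, 1_000_000, 120_000),
--         (1_000_001, 1_050_000, 110_000),
--         (1_050_001, 1_100_000,  90_000),
--         (1_100_001, 1_150_000,  70_000),
--         (1_150_001, 1_200_000,  60_000),
--         (1_200_001, 1_250_000,  40_000),
--         (1_250_001, 1_300_000,  20_000),
--         (1_300_001, 1_330_000,  10_000),
--     ]
--
--     if taxpayer_income <= 9_000_000:
--         brackets = _brackets_900
--     elif taxpayer_income <= 9_500_000:
--         brackets = _brackets_950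
--     else:
--         brackets = _brackets_1000
--
--     for low, high, deduction in brackets:
--         if low <= spouse_income <= high:
--             return deduction
--     return 0
-- ===== SOURCE B (Python) =====
-- def _spouse_special_deduction(taxpayer_income: int, spouse_income: int) -> int:
--     """Closed-form bracket indexing instead of a linear scan over range triples."""
--     if taxpayer_income <= 9_000_000:
--         d = [380_000, 360_000, 310_000, 260_000, 210_000, 160_000, 110_000, 60_000, 30_000]
--     elif taxpayer_income <= 9_500_000:
--         d = [260_000, 240_000, 210_000, 180_000, 140_000, 110_000, 80_000, 40_000, 20_000]
--     else:
--         d = [130_000, 120_000, 110_000, 90_000, 70_000, 60_000, 40_000, 20_000, 10_000]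
--     if spouse_income < 480_001 or spouse_income > 1_330_000:
--         return 0
--     if spouse_income <= 950_000:
--         return d[0]
--     return d[(spouse_income - 950_001) // 50_000 + 1]
-- ===== Notes on version B (the rewrite author's own statement) =====
-- stated objective: alternative
-- what changed: Replaces the linear scan over (low, high, deduction) triples by storing each table as a plain 9-element deduction list and computing the bracket index in closed form: (spouse_income - 950001) // 50000 + 1.
import Mathlib
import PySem

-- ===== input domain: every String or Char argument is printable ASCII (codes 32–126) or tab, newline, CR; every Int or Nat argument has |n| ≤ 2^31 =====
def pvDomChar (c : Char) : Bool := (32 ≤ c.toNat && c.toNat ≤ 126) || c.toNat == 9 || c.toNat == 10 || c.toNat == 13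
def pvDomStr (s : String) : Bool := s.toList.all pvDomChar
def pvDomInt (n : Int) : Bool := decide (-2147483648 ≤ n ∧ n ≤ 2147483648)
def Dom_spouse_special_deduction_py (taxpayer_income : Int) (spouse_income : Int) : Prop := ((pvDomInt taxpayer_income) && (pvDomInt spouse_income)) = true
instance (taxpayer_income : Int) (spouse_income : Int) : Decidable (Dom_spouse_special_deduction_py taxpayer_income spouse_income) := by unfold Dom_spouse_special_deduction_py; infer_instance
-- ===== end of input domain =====

-- B replaces A's linear scan over (low, high, deduction) triples by closed-form
-- arithmetic indexing into a 9-element deduction list (objective: alternative).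

-- B replaces A's linear scan over (low, high, deduction) triples by closed-form
-- arithmetic indexing into a 9-element deduction list (objective: alternative).

-- ===== PORT A =====
-- the for-loop with early return over the selected bracket table
def pvLoopA : List (Int × Int × Int) → Int → Int
  | [], _ => 0
  | (low, high, ded) :: rest, s => if low ≤ s ∧ s ≤ high then ded else pvLoopA rest s

def spouse_special_deduction_py (taxpayer_income : Int) (spouse_income : Int) : Int :=
  pvLoopA
    (if taxpayer_income ≤ 9000000 then
      [(480001, 950000, 380000), (950001, 1000000, 360000), (1000001, 1050000, 310000),
       (1050001, 1100000, 260000), (1100001, 1150000, 210000), (1150001, 1200000, 160000),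
       (1200001, 1250000, 110000), (1250001, 1300000, 60000), (1300001, 1330000, 30000)]
     else if taxpayer_income ≤ 9500000 then
      [(480001, 950000, 260000), (950001, 1000000, 240000), (1000001, 1050000, 210000),
       (1050001, 1100000, 180000), (1100001, 1150000, 140000), (1150001, 1200000, 110000),
       (1200001, 1250000, 80000), (1250001, 1300000, 40000), (1300001, 1330000, 20000)]
     else
      [(480001, 950000, 130000), (950001, 1000000, 120000), (1000001, 1050000, 110000),
       (1050001, 1100000, 90000), (1100001, 1150000, 70000), (1150001, 1200000, 60000),
       (1200001, 1250000, 40000), (1250001, 1300000, 20000), (1300001, 1330000, 10000)])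
    spouse_income

-- ===== PORT B =====
-- d[idx] with idx in range by construction; `.getD 0` only totalizes (pyGet? is never none on the reached indices)
def spouse_special_deduction_py_alt (taxpayer_income : Int) (spouse_income : Int) : Int :=
  let d : List Int :=
    if taxpayer_income ≤ 9000000 then
      [380000, 360000, 310000, 260000, 210000, 160000, 110000, 60000, 30000]
    else if taxpayer_income ≤ 9500000 then
      [260000, 240000, 210000, 180000, 140000, 110000, 80000, 40000, 20000]
    else
      [130000, 120000, 110000, 90000, 70000, 60000, 40000, 20000, 10000]
  if spouse_income < 480001 ∨ spouse_income > 1330000 then 0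
  else if spouse_income ≤ 950000 then (PySem.List.pyGet? d 0).getD 0
  else (PySem.List.pyGet? d (PySem.Int.floordiv (spouse_income - 950001) 50000 + 1)).getD 0

-- ===== PRECONDITION & SPEC =====
def Spec_spouse_special_deduction_py (taxpayer_income : Int) (spouse_income : Int) (out : Int) : Prop := out = spouse_special_deduction_py_alt taxpayer_income spouse_income
instance (taxpayer_income : Int) (spouse_income : Int) (out : Int) : Decidable (Spec_spouse_special_deduction_py taxpayer_income spouse_income out) := by unfold Spec_spouse_special_deduction_py; infer_instance

-- ===== CLAIM (what is proved, stated in full; the proofs are below) =====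
def Claim_equal_spouse_special_deduction_py : Prop := ∀ (taxpayer_income : Int) (spouse_income : Int), Dom_spouse_special_deduction_py taxpayer_income spouse_income → Spec_spouse_special_deduction_py taxpayer_income spouse_income (spouse_special_deduction_py taxpayer_income spouse_income)

-- ===== LEMMAS AND PROOFS =====

-- one table, nine symbolic deductions: the linear scan equals the closed-form index lookup
set_option maxHeartbeats 1600000 in
lemma pv_table_eq (d0 d1 d2 d3 d4 d5 d6 d7 d8 s : Int) :
    pvLoopA
      [(480001, 950000, d0), (950001, 1000000, d1), (1000001, 1050000, d2),
       (1050001, 1100000, d3), (1100001, 1150000, d4), (1150001, 1200000, d5),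
       (1200001, 1250000, d6), (1250001, 1300000, d7), (1300001, 1330000, d8)] s
    = (if s < 480001 ∨ s > 1330000 then 0
       else if s ≤ 950000 then (PySem.List.pyGet? [d0, d1, d2, d3, d4, d5, d6, d7, d8] 0).getD 0
       else (PySem.List.pyGet? [d0, d1, d2, d3, d4, d5, d6, d7, d8]
              (PySem.Int.floordiv (s - 950001) 50000 + 1)).getD 0) := by
  by_cases h0 : s < 480001 ∨ s > 1330000
  · have h1 : ¬ ((480001:Int) ≤ s ∧ s ≤ 950000) := by omega
    have h2 : ¬ ((950001:Int) ≤ s ∧ s ≤ 1000000) := by omega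
    have h3 : ¬ ((1000001:Int) ≤ s ∧ s ≤ 1050000) := by omega
    have h4 : ¬ ((1050001:Int) ≤ s ∧ s ≤ 1100000) := by omega
    have h5 : ¬ ((1100001:Int) ≤ s ∧ s ≤ 1150000) := by omega
    have h6 : ¬ ((1150001:Int) ≤ s ∧ s ≤ 1200000) := by omega
    have h7 : ¬ ((1200001:Int) ≤ s ∧ s ≤ 1250000) := by omega
    have h8 : ¬ ((1250001:Int) ≤ s ∧ s ≤ 1300000) := by omega
    have h9 : ¬ ((1300001:Int) ≤ s ∧ s ≤ 1330000) := by omega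
    simp [pvLoopA, h0, h1, h2, h3, h4, h5, h6, h7, h8, h9]
  · simp only [if_neg h0]
    rw [not_or, not_lt, not_lt] at h0
    obtain ⟨h0a, h0b⟩ := h0
    by_cases hlow : s ≤ 950000
    · have h1 : (480001:Int) ≤ s ∧ s ≤ 950000 := by omega
      simp [pvLoopA, h1, PySem.List.pyGet?, PySem.List.pyIdx?]
    · obtain ⟨q, hqdef⟩ : ∃ q, PySem.Int.floordiv (s - 950001) 50000 = q := ⟨_, rfl⟩
      obtain ⟨hqa, hqb⟩ := (PySem.Int.floordiv_eq_iff_of_pos (by norm_num)).mp hqdef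
      rw [hqdef]
      have hq0 : 0 ≤ q ∧ q ≤ 7 := by constructor <;> nlinarith
      obtain ⟨hq1, hq2⟩ := hq0
      simp only [if_neg hlow]
      interval_cases q
      · rw [show ((0:Int)+1) = ((1:Nat):Int) from rfl, PySem.List.pyGet?_natCast]
        simp only [pvLoopA]
        split_ifs <;> first | rfl | omega
      · rw [show ((1:Int)+1) = ((2:Nat):Int) from rfl, PySem.List.pyGet?_natCast]
        simp only [pvLoopA]
        split_ifs <;> first | rfl | omega
      · rw [show ((2:Int)+1) = ((3:Nat):Int) from rfl, PySem.List.pyGet?_natCast]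
        simp only [pvLoopA]
        split_ifs <;> first | rfl | omega
      · rw [show ((3:Int)+1) = ((4:Nat):Int) from rfl, PySem.List.pyGet?_natCast]
        simp only [pvLoopA]
        split_ifs <;> first | rfl | omega
      · rw [show ((4:Int)+1) = ((5:Nat):Int) from rfl, PySem.List.pyGet?_natCast]
        simp only [pvLoopA]
        split_ifs <;> first | rfl | omega
      · rw [show ((5:Int)+1) = ((6:Nat):Int) from rfl, PySem.List.pyGet?_natCast]
        simp only [pvLoopA]
        split_ifs <;> first | rfl | omega
      · rw [show ((6:Int)+1) = ((7:Nat):Int) from rfl, PySem.List.pyGet?_natCast]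
        simp only [pvLoopA]
        split_ifs <;> first | rfl | omega
      · rw [show ((7:Int)+1) = ((8:Nat):Int) from rfl, PySem.List.pyGet?_natCast]
        simp only [pvLoopA]
        split_ifs <;> first | rfl | omega

-- ===== VERDICT (by name: the statement is the Claim_ definition above) =====
theorem spouse_special_deduction_py_spec : Claim_equal_spouse_special_deduction_py := by
  intro t s _
  unfold Spec_spouse_special_deduction_py spouse_special_deduction_py spouse_special_deduction_py_alt
  by_cases h1 : t ≤ 9000000
  · simp only [if_pos h1]; exact pv_table_eq ..
  · by_cases h2 : t ≤ 9500000
    · simp only [if_neg h1, if_pos h2]; exact pv_table_eq ..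
    · simp only [if_neg h1, if_neg h2]; exact pv_table_eq ..
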